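-- pv_equiv track=rewrite | github.com/phijack/Prop_pack_experiment | prop_pack.py | rearranges
-- ===== SOURCE A (Python) =====
-- def product(l):
--     p = 1
--     for i in l:
--         p *= i
--     return p
--
-- def tablegen(n,Nc,total):
--     table = []
--     for i in range(total):
--         l = []
--         q = i
--         for j in range(n):
--             l.append((q % (Nc[j])))
--             q = q//Nc[j]
--         t = tuple(l)
--         table.append(t)
--     return table
--
-- def rearranges(arr,n,Nc):
--     s = []
--     total = product(Nc)
--     for i in range(n):
--         t = [0]*Nc[i]
--         t.append(arr[total])
--         s.append(t)
--     table = tablegen(n,Nc,total)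
--     for i in range(total):
--         index = table[i]
--         for j in range(n):
--             s[j][index[j]] = s[j][index[j]] + arr[i]
--     return s
-- ===== SOURCE B (Python) =====
-- def rearranges(arr, n, Nc):
--     # One pass with an incremental odometer instead of a materialized digit table.
--     total = 1
--     for c in Nc:
--         total *= c
--     s = [[0] * Nc[i] + [arr[total]] for i in range(n)]
--     digits = [0] * n
--     for i in range(total):
--         for j in range(n):
--             s[j][digits[j]] += arr[i]
--         j = 0
--         while j < n:
--             digits[j] += 1
--             if digits[j] < Nc[j]:
--                 break
--             digits[j] = 0
--             j += 1
--     return s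
-- ===== Notes on version B (the rewrite author's own statement) =====
-- stated objective: simpler
-- what changed: B removes tablegen and the materialized digit table entirely: it maintains an incremental odometer digit vector and advances it by carry propagation once per element, computing the same per-axis marginals in one pass with O(n) auxiliary state instead of precomputing an O(n*total) table.
-- outside the precondition, e.g. on rearranges([1, 2, 3, 4], 2, [-1, 3, -1]): A returns [[10], [1, 3, 2, 4]], B returns [[10], [1, 2, 3, 4]]
import Mathlib
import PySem

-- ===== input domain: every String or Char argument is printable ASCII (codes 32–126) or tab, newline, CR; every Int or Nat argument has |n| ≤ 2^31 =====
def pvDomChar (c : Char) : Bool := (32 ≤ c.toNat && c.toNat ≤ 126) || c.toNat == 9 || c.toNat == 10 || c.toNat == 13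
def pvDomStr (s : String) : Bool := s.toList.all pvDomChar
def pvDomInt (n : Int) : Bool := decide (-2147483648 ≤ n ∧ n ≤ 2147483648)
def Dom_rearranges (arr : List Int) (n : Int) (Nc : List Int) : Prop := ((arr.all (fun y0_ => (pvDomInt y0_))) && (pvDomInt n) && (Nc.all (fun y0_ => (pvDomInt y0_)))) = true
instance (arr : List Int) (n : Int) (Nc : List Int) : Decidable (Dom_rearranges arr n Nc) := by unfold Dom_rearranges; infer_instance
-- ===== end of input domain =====

-- B drops A's materialized digit table (tablegen) and instead advances an odometer digit
-- vector by carry propagation: one pass, O(n) auxiliary state instead of the table.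

-- ===== PORT A =====
def pyProduct (l : List Int) : Int := l.foldl (fun p i => p * i) 1

-- s[j][k] = s[j][k] + v, Python index semantics (the inner statement both Pythons share)
def pyAdd2 (s : List (List Int)) (j k v : Int) : List (List Int) :=
  let row := PySem.List.pyGetD s j []
  PySem.List.pySetD s j (PySem.List.pySetD row k (PySem.List.pyGetD row k 0 + v))

-- the Python list 'table' is ported as an Array (append = push, O(1) positional read)
def tablegen (n : Int) (Nc : List Int) (total : Int) : Array (List Int) :=
  (PySem.List.pyRange 0 total 1).foldl (fun table i =>
    let l := ((PySem.List.pyRange 0 n 1).foldl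
      (fun (lq : List Int × Int) j =>
        (lq.1 ++ [PySem.Int.mod lq.2 (PySem.List.pyGetD Nc j 0)],
         PySem.Int.floordiv lq.2 (PySem.List.pyGetD Nc j 0)))
      ([], i)).1
    table.push l) #[]

def rearranges (arr : List Int) (n : Int) (Nc : List Int) : List (List Int) :=
  let total := pyProduct Nc
  let s := (PySem.List.pyRange 0 n 1).foldl (fun s i =>
    s ++ [List.replicate (PySem.List.pyGetD Nc i 0).toNat 0 ++ [PySem.List.pyGetD arr total 0]]) []
  let table := tablegen n Nc total
  (PySem.List.pyRange 0 total 1).foldl (fun s i =>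
    let index := table.getD i.toNat []    -- table[i]; i ∈ range(total) is nonnegative and in range
    (PySem.List.pyRange 0 n 1).foldl (fun s j =>
      pyAdd2 s j (PySem.List.pyGetD index j 0) (PySem.List.pyGetD arr i 0)) s) s

-- ===== PORT B =====
-- the while loop 'digits[j] += 1; break, or reset and carry' scanning j = 0,1,…
def incDigits : List Int → List Int → List Int
  | [], _ => []
  | d :: ds, [] => (d + 1) :: ds      -- Python would raise reading Nc[j]; unreachable under Pre_
  | d :: ds, c :: cs => if d + 1 < c then (d + 1) :: ds else 0 :: incDigits ds cs

def rearranges_alt (arr : List Int) (n : Int) (Nc : List Int) : List (List Int) :=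
  let total := Nc.foldl (fun p c => p * c) 1
  let s := (PySem.List.pyRange 0 n 1).map (fun i =>
    List.replicate (PySem.List.pyGetD Nc i 0).toNat 0 ++ [PySem.List.pyGetD arr total 0])
  ((PySem.List.pyRange 0 total 1).foldl (fun (sd : List (List Int) × List Int) i =>
      ((PySem.List.pyRange 0 n 1).foldl (fun s j =>
        pyAdd2 s j (PySem.List.pyGetD sd.2 j 0) (PySem.List.pyGetD arr i 0)) sd.1,
       incDigits sd.2 Nc))
    (s, List.replicate n.toNat 0)).1

-- ===== PRECONDITION & SPEC =====
-- Pre_ excludes inputs (with n > 0) on which A raises an IndexError (n > len(Nc), or arr[product(Nc)]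
-- out of range) and those with a negative Nc entry whose product is positive: there A's digits go
-- through negative moduli and negative list indices, an accident of A's implementation, and A and B
-- can disagree.
def Pre_rearranges (arr : List Int) (n : Int) (Nc : List Int) : Prop :=
  n ≤ 0 ∨ (n ≤ (Nc.length : Int) ∧
    (((∀ x ∈ Nc, 0 ≤ x) ∧ Nc.foldl (fun p c => p * c) 1 < (arr.length : Int)) ∨
     (Nc.foldl (fun p c => p * c) 1 ≤ 0 ∧ -(arr.length : Int) ≤ Nc.foldl (fun p c => p * c) 1 ∧
      Nc.foldl (fun p c => p * c) 1 < (arr.length : Int))))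
instance (arr : List Int) (n : Int) (Nc : List Int) : Decidable (Pre_rearranges arr n Nc) := by
  unfold Pre_rearranges; infer_instance

def pvWitness_rearranges : List Int × Int × List Int := ([1, 2, 3, 4, 5, 6, 7], 2, [2, 3])

def Spec_rearranges (arr : List Int) (n : Int) (Nc : List Int) (out : List (List Int)) : Prop := out = rearranges_alt arr n Nc
instance (arr : List Int) (n : Int) (Nc : List Int) (out : List (List Int)) : Decidable (Spec_rearranges arr n Nc out) := by unfold Spec_rearranges; infer_instance

-- ===== CLAIM (what is proved, stated in full; the proofs are below) =====
def Claim_equal_rearranges : Prop := ∀ (arr : List Int) (n : Int) (Nc : List Int), Dom_rearranges arr n Nc → Pre_rearranges arr n Nc → Spec_rearranges arr n Nc (rearranges arr n Nc)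

-- ===== LEMMAS AND PROOFS =====

-- mixed-radix digits of q for radices cs (closed form of A's inner tablegen loop)
def specD : List Int → Int → List Int
  | [], _ => []
  | c :: cs, q => PySem.Int.mod q c :: specD cs (PySem.Int.floordiv q c)

-- the shared inner loop 'for j in range(n): s[j][d[j]] += arr[i]'
def innerAdd (arr : List Int) (n : Int) (s : List (List Int)) (d : List Int) (i : Int) : List (List Int) :=
  (PySem.List.pyRange 0 n 1).foldl (fun s j =>
    pyAdd2 s j (PySem.List.pyGetD d j 0) (PySem.List.pyGetD arr i 0)) s

lemma specD_zero : ∀ (cs : List Int), (∀ c ∈ cs, 1 ≤ c) →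
    specD cs 0 = List.replicate cs.length 0 := by
  intro cs h
  induction cs with
  | nil => rfl
  | cons c cs ih =>
    have hc : (0:Int) < c := by have := h c (by simp); omega
    simp [specD, PySem.Int.mod_eq_emod_of_pos hc, PySem.Int.floordiv_eq_ediv_of_pos hc,
      ih (fun x hx => h x (by simp [hx])), List.replicate_succ]

lemma incDigits_specD : ∀ (cs ext : List Int) (q : Int), (∀ c ∈ cs, 1 ≤ c) → 0 ≤ q →
    incDigits (specD cs q) (cs ++ ext) = specD cs (q + 1) := by
  intro cs
  induction cs with
  | nil => intro ext q _ _; rfl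
  | cons c cs ih =>
    intro ext q h hq
    have hc : (0:Int) < c := by have := h c (by simp); omega
    have hcne : c ≠ 0 := by omega
    have hr0 : 0 ≤ q % c := Int.emod_nonneg q hcne
    have hrc : q % c < c := Int.emod_lt_of_pos q hc
    have hqd : c * (q / c) + q % c = q := Int.mul_ediv_add_emod q c
    have hdnn : 0 ≤ q / c := Int.ediv_nonneg hq (le_of_lt hc)
    simp only [specD, PySem.Int.mod_eq_emod_of_pos hc, PySem.Int.floordiv_eq_ediv_of_pos hc,
      List.cons_append, incDigits]
    by_cases hlt : q % c + 1 < c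
    · have h1 : (q + 1) % c = q % c + 1 := by
        have he : q + 1 = (q % c + 1) + c * (q / c) := by omega
        rw [he, Int.add_mul_emod_self_left, Int.emod_eq_of_lt (by omega) hlt]
      have h2 : (q + 1) / c = q / c := by
        have he : q + 1 = (q % c + 1) + c * (q / c) := by omega
        rw [he, Int.add_mul_ediv_left _ _ hcne, Int.ediv_eq_zero_of_lt (by omega) hlt, zero_add]
      simp [hlt, h1, h2]
    · have heq : q % c + 1 = c := by omega
      have hmul : c * (q / c + 1) = c * (q / c) + c := by ring
      have he : q + 1 = c * (q / c + 1) := by omega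
      have h1 : (q + 1) % c = 0 := by rw [he, Int.mul_emod_right]
      have h2 : (q + 1) / c = q / c + 1 := by rw [he, Int.mul_ediv_cancel_left _ hcne]
      simp [hlt, h1, h2, ih ext (q / c) (fun x hx => h x (by simp [hx])) hdnn]

-- A's inner tablegen loop over j ∈ range(a, a+m) computes the digits of q for Nc[a..a+m)
lemma rowFold : ∀ (m : Nat) (Nc : List Int) (a q : Int) (acc : List Int), 0 ≤ a →
    a.toNat + m ≤ Nc.length →
    ((PySem.List.pyRange a (a + (m : Int)) 1).foldl
      (fun (lq : List Int × Int) j =>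
        (lq.1 ++ [PySem.Int.mod lq.2 (PySem.List.pyGetD Nc j 0)],
         PySem.Int.floordiv lq.2 (PySem.List.pyGetD Nc j 0)))
      (acc, q)).1 = acc ++ specD ((Nc.drop a.toNat).take m) q := by
  intro m
  induction m with
  | zero =>
    intro Nc a q acc _ _
    simp [PySem.List.pyRange_one_eq_nil (le_refl a), specD]
  | succ m ih =>
    intro Nc a q acc ha hlen
    have haN : a.toNat < Nc.length := by omega
    rw [PySem.List.pyRange_one_cons (by push_cast; omega : a < a + ((m + 1 : Nat) : Int))]
    have hget : PySem.List.pyGetD Nc a 0 = Nc[a.toNat] :=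
      PySem.List.pyGetD_eq_getElem Nc 0 ha (by omega)
    have hdrop : Nc.drop a.toNat = Nc[a.toNat] :: Nc.drop (a.toNat + 1) :=
      List.drop_eq_getElem_cons haN
    have harw : a + ((m + 1 : Nat) : Int) = (a + 1) + (m : Int) := by push_cast; ring
    simp only [List.foldl_cons, harw]
    rw [ih Nc (a + 1) (PySem.Int.floordiv q (PySem.List.pyGetD Nc a 0))
        (acc ++ [PySem.Int.mod q (PySem.List.pyGetD Nc a 0)]) (by omega)
        (by rw [Int.toNat_add ha (by omega)]; omega)]
    have htn : (a + 1).toNat = a.toNat + 1 := by omega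
    rw [htn, hget]
    conv_rhs => rw [hdrop]
    simp only [List.take_succ_cons, specD, List.append_assoc, List.singleton_append]

lemma foldl_push {α β : Type} (f : α → β) :
    ∀ (l : List α) (A : Array β), l.foldl (fun a x => a.push (f x)) A = A ++ (l.map f).toArray := by
  intro l
  induction l with
  | nil => intro A; simp
  | cons x xs ih => intro A; simp [ih]

-- odometer-synchronised fold: the pair fold equals (plain fold, final digits)
lemma sync {α β : Type} (H : α → β → Int → α) (G : β → β) (dig : Int → β) (T : Int)
    (hG : ∀ i : Int, 0 ≤ i → i < T → G (dig i) = dig (i + 1)) :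
    ∀ (t : Nat) (a : Int) (s : α), 0 ≤ a → a + (t : Int) = T →
    (PySem.List.pyRange a T 1).foldl (fun p i => (H p.1 p.2 i, G p.2)) (s, dig a)
      = ((PySem.List.pyRange a T 1).foldl (fun s i => H s (dig i) i) s, dig T) := by
  intro t
  induction t with
  | zero =>
    intro a s _ hT
    have haT : a = T := by omega
    simp [haT, PySem.List.pyRange_one_eq_nil (le_refl T)]
  | succ t ih =>
    intro a s ha hT
    rw [PySem.List.pyRange_one_cons (by omega : a < T)]
    simp only [List.foldl_cons]
    rw [hG a ha (by omega)]
    exact ih (a + 1) (H s (dig a) a) (by omega) (by omega)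

-- ===== VERDICT (by name: the statement is the Claim_ definition above) =====
theorem rearranges_spec : Claim_equal_rearranges := by
  intro arr n Nc _ hpre
  unfold Spec_rearranges rearranges rearranges_alt pyProduct
  simp only [PySem.List.foldl_append_singleton_eq_map, List.nil_append]
  set total := Nc.foldl (fun p c => p * c) 1 with htot
  set s0 := (PySem.List.pyRange 0 n 1).map (fun i =>
    List.replicate (PySem.List.pyGetD Nc i 0).toNat 0 ++ [PySem.List.pyGetD arr total 0]) with hs0
  have hlen : n.toNat ≤ Nc.length := by
    rcases hpre with h | ⟨h, _⟩ <;> omega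
  set cs := Nc.take n.toNat with hcs
  by_cases hT : total ≤ 0
  · rw [PySem.List.pyRange_one_eq_nil hT]
    simp
  · push_neg at hT
    have hcspos : ∀ c ∈ cs, 1 ≤ c := by
      rcases (show n ≤ 0 ∨ 0 < n by omega) with hn | hn
      · have h0 : n.toNat = 0 := by omega
        simp [hcs, h0]
      · rcases hpre with h | ⟨_, ⟨hnn, _⟩ | ⟨hneg, _, _⟩⟩
        · omega
        · intro c hc
          have h0 : 0 ≤ c := hnn c (List.mem_of_mem_take hc)
          by_contra hlt
          push_neg at hlt
          have hc0 : c = 0 := by omega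
          have hz : total = 0 := by
            rw [htot, ← List.prod_eq_foldl]
            exact List.prod_eq_zero (hc0 ▸ List.mem_of_mem_take hc)
          omega
        · omega
    -- the table rows are the mixed-radix digit vectors
    have hrow : ∀ i : Int,
        ((PySem.List.pyRange 0 n 1).foldl
          (fun (lq : List Int × Int) j =>
            (lq.1 ++ [PySem.Int.mod lq.2 (PySem.List.pyGetD Nc j 0)],
             PySem.Int.floordiv lq.2 (PySem.List.pyGetD Nc j 0)))
          ([], i)).1 = specD cs i := by
      intro i
      rcases (show 0 ≤ n ∨ n < 0 by omega) with hn | hn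
      · have hcast : n = (0:Int) + ((n.toNat : Nat) : Int) := by omega
        rw [hcast, rowFold n.toNat Nc 0 i [] (le_refl 0) (by simpa using hlen)]
        simp [hcs]
      · rw [PySem.List.pyRange_one_eq_nil (by omega : n ≤ 0)]
        have h0 : n.toNat = 0 := by omega
        simp [hcs, h0, specD]
    have htab : ∀ i : Int, 0 ≤ i → i < total →
        (tablegen n Nc total).getD i.toNat [] = specD cs i := by
      intro i h0 hi
      unfold tablegen
      rw [foldl_push]
      have hk : i.toNat < ((PySem.List.pyRange 0 total 1).map (fun i =>
          ((PySem.List.pyRange 0 n 1).foldl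
            (fun (lq : List Int × Int) j =>
              (lq.1 ++ [PySem.Int.mod lq.2 (PySem.List.pyGetD Nc j 0)],
               PySem.Int.floordiv lq.2 (PySem.List.pyGetD Nc j 0)))
            ([], i)).1)).length := by
        simp [PySem.List.length_pyRange_one]; omega
      have hcast : (0:Int) + (i.toNat : Int) = i := by omega
      simp only [Array.getD, Array.empty_append, List.size_toArray,
        Array.getInternal_eq_getElem, List.getElem_toArray, List.getElem_map,
        PySem.List.getElem_pyRange_one, hcast, hrow]
      have hk2 : i.toNat < (List.map (fun i => specD cs i) (PySem.List.pyRange 0 total 1)).length := by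
        simp [PySem.List.length_pyRange_one]; omega
      rw [dif_pos hk2]
    have hdig0 : List.replicate n.toNat (0:Int) = specD cs 0 := by
      rw [specD_zero cs hcspos, hcs, List.length_take, Nat.min_eq_left hlen]
    have hinc : ∀ i : Int, 0 ≤ i → i < total →
        incDigits (specD cs i) Nc = specD cs (i + 1) := by
      intro i h0 _
      have hsplit : cs ++ Nc.drop n.toNat = Nc := List.take_append_drop _ _
      calc incDigits (specD cs i) Nc
          = incDigits (specD cs i) (cs ++ Nc.drop n.toNat) := by rw [hsplit]
        _ = specD cs (i + 1) := incDigits_specD cs _ i hcspos h0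
    -- synchronise the two main loops
    have hsync := sync (innerAdd arr n) (fun b => incDigits b Nc) (fun i => specD cs i) total
      (fun i h0 hi => hinc i h0 hi) total.toNat 0 s0 (le_refl 0) (by omega)
    -- rewrite A's fold body to the H-form via membership congruence
    have hA : (PySem.List.pyRange 0 total 1).foldl (fun s i =>
        (PySem.List.pyRange 0 n 1).foldl (fun s j =>
          pyAdd2 s j (PySem.List.pyGetD ((tablegen n Nc total).getD i.toNat []) j 0)
            (PySem.List.pyGetD arr i 0)) s) s0
        = (PySem.List.pyRange 0 total 1).foldl (fun s i => innerAdd arr n s (specD cs i) i) s0 := by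
      apply PySem.List.foldl_congr_mem
      intro acc i hi
      rw [PySem.List.mem_pyRange_one] at hi
      rw [htab i hi.1 hi.2]
      rfl
    rw [hA, hdig0]
    exact (congrArg Prod.fst hsync).symm
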